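-- pv_equiv track=rewrite | github.com/nerdneilsfield/sluice-pipeline | sluice/sinks/_feishu_post_render.py | _indent_block
-- ===== SOURCE A (Python) =====
-- def _indent_block(text: str, prefix: str) -> str:
--     """Apply prefix to first line; indent subsequent lines by same width."""
--     if not text:
--         return prefix
--     lines = text.split("\n")
--     indent = " " * len(prefix)
--     result = [prefix + lines[0]]
--     for line in lines[1:]:
--         result.append(indent + line)
--     return "\n".join(result)
-- ===== SOURCE B (Python) =====
-- def _indent_block(text: str, prefix: str) -> str:
--     """Apply prefix to first line; indent subsequent lines by same width."""
--     return prefix + text.replace("\n", "\n" + " " * len(prefix))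
-- ===== Notes on version B (the rewrite author's own statement) =====
-- stated objective: simpler
-- what changed: Replaces the split/list-accumulation/join pipeline with a single string substitution: prefix + text.replace('\n', '\n' + indent); the empty-text special case disappears because ''.replace(...) is ''.
import Mathlib
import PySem

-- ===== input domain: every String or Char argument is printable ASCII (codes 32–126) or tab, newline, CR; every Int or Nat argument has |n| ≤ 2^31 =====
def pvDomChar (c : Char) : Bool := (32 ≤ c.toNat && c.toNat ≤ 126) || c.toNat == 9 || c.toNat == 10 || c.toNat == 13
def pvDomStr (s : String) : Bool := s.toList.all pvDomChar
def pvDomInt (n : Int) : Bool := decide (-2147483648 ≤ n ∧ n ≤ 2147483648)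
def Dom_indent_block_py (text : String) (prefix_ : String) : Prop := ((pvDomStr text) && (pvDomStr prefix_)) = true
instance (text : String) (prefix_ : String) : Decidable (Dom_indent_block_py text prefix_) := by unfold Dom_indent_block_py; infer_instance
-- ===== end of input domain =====

-- B replaces A's split/loop/join over a line list by the single substitution
-- prefix ++ text.replace("\n", "\n" ++ indent) (objective: simpler); proved equal on all inputs.


-- ===== PORT A =====
-- literal port of A: empty-text guard, split on "\n", build the result line list, join
def indent_block_py (text : String) (prefix_ : String) : String :=
  if text.toList = [] then prefix_
  else
    let lines := PySem.Chars.splitOn text.toList ['\n']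
    let indent := List.replicate prefix_.toList.length ' '
    let result := (prefix_.toList ++ lines.headD []) :: lines.tail.map (fun line => indent ++ line)
    String.ofList (PySem.Chars.join ['\n'] result)

-- ===== PORT B =====
-- literal port of B: prefix + text.replace("\n", "\n" + " " * len(prefix))
def indent_block_py_alt (text : String) (prefix_ : String) : String :=
  String.ofList (prefix_.toList ++
    PySem.Chars.replace text.toList ['\n'] ('\n' :: List.replicate prefix_.toList.length ' '))

-- ===== PRECONDITION & SPEC =====
def Spec_indent_block_py (text : String) (prefix_ : String) (out : String) : Prop := out = indent_block_py_alt text prefix_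
instance (text : String) (prefix_ : String) (out : String) : Decidable (Spec_indent_block_py text prefix_ out) := by unfold Spec_indent_block_py; infer_instance

-- ===== CLAIM (what is proved, stated in full; the proofs are below) =====
def Claim_equal_indent_block_py : Prop := ∀ (text : String) (prefix_ : String), Dom_indent_block_py text prefix_ → Spec_indent_block_py text prefix_ (indent_block_py text prefix_)

-- ===== LEMMAS AND PROOFS =====

/-- Simple recursive model of splitting a char list on `'\n'`. -/
def splitNL : List Char → List (List Char)
  | [] => [[]]
  | c :: rest =>
    if c = '\n' then [] :: splitNL rest
    else match splitNL rest with
      | [] => [[c]]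
      | h :: t => (c :: h) :: t

/-- Simple recursive model of replacing every `'\n'` by `'\n' :: indent`. -/
def replNL (indent : List Char) : List Char → List Char
  | [] => []
  | c :: rest =>
    if c = '\n' then '\n' :: (indent ++ replNL indent rest)
    else c :: replNL indent rest

theorem splitNL_cons_nl (rest : List Char) : splitNL ('\n' :: rest) = [] :: splitNL rest := by
  simp [splitNL]

theorem splitNL_cons_ne {c : Char} (hc : c ≠ '\n') (rest : List Char) :
    splitNL (c :: rest) =
      match splitNL rest with | [] => [[c]] | h :: t => (c :: h) :: t := by
  simp [splitNL, hc]

theorem replNL_cons_nl (indent rest : List Char) :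
    replNL indent ('\n' :: rest) = '\n' :: (indent ++ replNL indent rest) := by
  simp [replNL]

theorem replNL_cons_ne (indent : List Char) {c : Char} (hc : c ≠ '\n') (rest : List Char) :
    replNL indent (c :: rest) = c :: replNL indent rest := by
  simp [replNL, hc]

theorem splitNL_ne_nil (cs : List Char) : splitNL cs ≠ [] := by
  cases cs with
  | nil => simp [splitNL]
  | cons c rest =>
    simp only [splitNL]
    split
    · simp
    · split <;> simp

theorem splitOn_go_spec :
    ∀ (fuel : Nat) (l cur : List Char) (acc : List (List Char)), l.length < fuel →
      PySem.Chars.splitOn.go ['\n'] fuel l cur acc =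
        acc.reverse ++ (match splitNL l with
          | [] => [cur.reverse]
          | h :: t => (cur.reverse ++ h) :: t) := by
  intro fuel
  induction fuel with
  | zero => intro l cur acc h; omega
  | succ f ih =>
    intro l cur acc h
    cases l with
    | nil => simp [PySem.Chars.splitOn.go, splitNL]
    | cons c rest =>
      simp only [PySem.Chars.splitOn.go]
      by_cases hc : c = '\n'
      · subst hc
        rw [if_pos (by simp [List.isPrefixOf])]
        rw [show List.drop (['\n'] : List Char).length ('\n' :: rest) = rest by simp]
        rw [ih rest [] (cur.reverse :: acc) (by simpa using Nat.lt_of_succ_lt_succ h)]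
        have hne := splitNL_ne_nil rest
        cases hs : splitNL rest with
        | nil => exact absurd hs hne
        | cons h' t => simp [splitNL_cons_nl, hs]
      · rw [if_neg (by simp [List.isPrefixOf, Ne.symm hc])]
        rw [ih rest (c :: cur) acc (by simpa using Nat.lt_of_succ_lt_succ h)]
        rw [splitNL_cons_ne hc]
        have hne := splitNL_ne_nil rest
        cases hs : splitNL rest with
        | nil => exact absurd hs hne
        | cons h' t => simp [hs]

theorem splitOn_eq_splitNL (cs : List Char) :
    PySem.Chars.splitOn cs ['\n'] = splitNL cs := by
  unfold PySem.Chars.splitOn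
  rw [splitOn_go_spec (cs.length + 1) cs [] [] (by omega)]
  have hne := splitNL_ne_nil cs
  cases hs : splitNL cs with
  | nil => exact absurd hs hne
  | cons h t => simp

theorem replace_go_spec (indent : List Char) :
    ∀ (fuel : Nat) (l acc : List Char), l.length ≤ fuel →
      PySem.Chars.replace.go ['\n'] ('\n' :: indent) fuel l acc =
        acc.reverse ++ replNL indent l := by
  intro fuel
  induction fuel with
  | zero =>
    intro l acc h
    have : l = [] := List.length_eq_zero_iff.mp (Nat.le_zero.mp h)
    subst this
    simp [PySem.Chars.replace.go, replNL]
  | succ f ih =>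
    intro l acc h
    cases l with
    | nil => simp [PySem.Chars.replace.go, replNL]
    | cons c rest =>
      simp only [PySem.Chars.replace.go]
      by_cases hc : c = '\n'
      · subst hc
        rw [if_pos (by simp [List.isPrefixOf])]
        rw [show List.drop (['\n'] : List Char).length ('\n' :: rest) = rest by simp]
        rw [ih rest _ (by simpa using Nat.le_of_succ_le_succ h)]
        rw [replNL_cons_nl]
        simp
      · rw [if_neg (by simp [List.isPrefixOf, Ne.symm hc])]
        rw [ih rest _ (by simpa using Nat.le_of_succ_le_succ h)]
        rw [replNL_cons_ne indent hc]
        simp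

theorem replace_eq_replNL (cs indent : List Char) :
    PySem.Chars.replace cs ['\n'] ('\n' :: indent) = replNL indent cs := by
  unfold PySem.Chars.replace
  rw [if_neg (by simp)]
  rw [replace_go_spec indent cs.length cs [] (le_refl _)]
  simp

theorem intercalate_cons_cons {α : Type} (sep x h : List α) (t : List (List α)) :
    sep.intercalate (x :: h :: t) = x ++ sep ++ sep.intercalate (h :: t) := by
  simp [List.intercalate, List.intersperse]

theorem intercalate_cons_append {α : Type} (sep p h : List α) (t : List (List α)) :
    sep.intercalate ((p ++ h) :: t) = p ++ sep.intercalate (h :: t) := by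
  cases t with
  | nil => simp [List.intercalate]
  | cons h' t' => rw [intercalate_cons_cons, intercalate_cons_cons]; simp

theorem join_splitNL_eq_replNL (indent : List Char) (cs : List Char) :
    PySem.Chars.join ['\n']
      (match splitNL cs with
        | [] => []
        | h :: t => h :: t.map (fun line => indent ++ line)) = replNL indent cs := by
  induction cs with
  | nil => simp [splitNL, replNL, PySem.Chars.join, List.intercalate]
  | cons c rest ih =>
    by_cases hc : c = '\n'
    · subst hc
      rw [splitNL_cons_nl, replNL_cons_nl]
      have hne := splitNL_ne_nil rest
      cases hs : splitNL rest with
      | nil => exact absurd hs hne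
      | cons h t =>
        rw [hs] at ih
        simp only [PySem.Chars.join, List.map_cons] at ih ⊢
        rw [intercalate_cons_cons ['\n'] [] (indent ++ h) (t.map (fun line => indent ++ line))]
        rw [intercalate_cons_append ['\n'] indent h (t.map (fun line => indent ++ line))]
        rw [ih]
        simp
    · rw [splitNL_cons_ne hc, replNL_cons_ne indent hc]
      have hne := splitNL_ne_nil rest
      cases hs : splitNL rest with
      | nil => exact absurd hs hne
      | cons h t =>
        rw [hs] at ih
        simp only [PySem.Chars.join] at ih ⊢
        rw [show (c :: h) = [c] ++ h from rfl,
            intercalate_cons_append ['\n'] [c] h (t.map (fun line => indent ++ line))]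
        rw [ih]
        simp

-- ===== VERDICT (by name: the statement is the Claim_ definition above) =====
theorem indent_block_py_spec : Claim_equal_indent_block_py := by
  intro text prefix_ _
  unfold Spec_indent_block_py indent_block_py indent_block_py_alt
  by_cases ht : text.toList = []
  · rw [if_pos ht, ht, replace_eq_replNL]
    simp [replNL]
  · rw [if_neg ht]
    rw [replace_eq_replNL]
    simp only [splitOn_eq_splitNL]
    have hne := splitNL_ne_nil text.toList
    cases hs : splitNL text.toList with
    | nil => exact absurd hs hne
    | cons h t =>
      have hmain := join_splitNL_eq_replNL (List.replicate prefix_.toList.length ' ') text.toList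
      rw [hs] at hmain
      simp only at hmain
      congr 1
      simp only [List.headD, List.tail_cons]
      rw [← hmain]
      simp only [PySem.Chars.join]
      rw [intercalate_cons_append ['\n'] prefix_.toList h
            (t.map (fun line => List.replicate prefix_.toList.length ' ' ++ line))]
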